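-- pv_equiv track=rewrite | github.com/Neuromophic/eNAS_leanrable_selectable_LNC | NEAT_LNC_genome/feed_forward.py | required_for_output
-- ===== SOURCE A (Python) =====
-- def required_for_output(inputs, outputs, connections):
--     required = set(outputs)
--     checked = set(outputs)
--     while True:
--         checking = set(a for (a, b) in connections if b in checked and a not in checked)
--
--         if not checking:
--             break
--         layer_nodes = set(x for x in checking if x not in inputs)
--
--         if not layer_nodes:
--             break
--
--         required = required.union(layer_nodes)
--         checked = checked.union(checking)
--
--     return required
-- ===== SOURCE B (Python) =====
-- def required_for_output(inputs, outputs, connections):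
--     # Build predecessor adjacency once, then do a layered frontier search:
--     # each round only the predecessors of the current frontier are examined.
--     preds = {}
--     for a, b in connections:
--         preds.setdefault(b, []).append(a)
--     input_set = set(inputs)
--     required = set(outputs)
--     checked = set(outputs)
--     frontier = set(outputs)
--     while frontier:
--         checking = set()
--         for node in frontier:
--             for a in preds.get(node, ()):
--                 if a not in checked:
--                     checking.add(a)
--         if not checking:
--             break
--         layer = set(x for x in checking if x not in input_set)
--         if not layer:
--             break
--         required |= layer
--         checked |= checking
--         frontier = checking
--     return required
-- ===== Notes on version B (the rewrite author's own statement) =====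
-- stated objective: faster
-- what changed: B precomputes a predecessor adjacency map once and runs the layered search expanding only the current frontier's predecessors, instead of rescanning the whole connection list on every round like A.
import Mathlib
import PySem

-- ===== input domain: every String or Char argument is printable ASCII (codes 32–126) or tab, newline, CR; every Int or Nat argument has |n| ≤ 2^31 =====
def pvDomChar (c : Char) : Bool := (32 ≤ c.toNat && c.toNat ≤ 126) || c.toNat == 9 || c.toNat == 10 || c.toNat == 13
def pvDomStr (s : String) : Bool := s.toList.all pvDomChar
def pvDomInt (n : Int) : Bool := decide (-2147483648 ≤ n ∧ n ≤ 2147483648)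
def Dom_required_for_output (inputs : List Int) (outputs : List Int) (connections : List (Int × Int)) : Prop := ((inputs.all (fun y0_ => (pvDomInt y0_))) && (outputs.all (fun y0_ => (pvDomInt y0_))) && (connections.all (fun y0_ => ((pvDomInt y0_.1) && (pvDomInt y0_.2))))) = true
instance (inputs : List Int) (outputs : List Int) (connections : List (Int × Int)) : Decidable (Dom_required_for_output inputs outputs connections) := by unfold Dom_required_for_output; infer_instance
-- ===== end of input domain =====

-- B replaces A's per-round rescan of the whole connection list by a precomputed predecessor map
-- expanded only along the current frontier (objective: faster). Both Pythons return a SET; under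
-- the List-encoding of sets both ports return its elements in ascending order (a canonical,
-- order-independent encoding of the same set — Python's set iteration order is not modelled).

-- ===== PORT A =====
-- checking = set(a for (a, b) in connections if b in checked and a not in checked)
def checkingScan (connections : List (Int × Int)) (checked : PySem.Set Int) : PySem.Set Int :=
  PySem.Set.ofList ((connections.filter
    (fun p => PySem.Set.contains checked p.2 && !PySem.Set.contains checked p.1)).map Prod.fst)

-- layer = set(x for x in checking if x not in inputs)
def layerOf (inputs : List Int) (checking : PySem.Set Int) : PySem.Set Int :=
  PySem.Set.ofList (checking.filter (fun x => !(inputs.contains x)))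

-- A's 'while True' loop; 'fuel' only bounds the number of rounds so the recursion is structural
-- (connections.length + 1 rounds always suffice: every non-breaking round adds at least one new
-- connection source to 'checked').
def reqLoopA (inputs : List Int) (connections : List (Int × Int)) :
    Nat → PySem.Set Int → PySem.Set Int → PySem.Set Int
  | 0, required, _ => required
  | fuel + 1, required, checked =>
    let checking := checkingScan connections checked
    if checking = [] then required
    else
      let layer_nodes := layerOf inputs checking
      if layer_nodes = [] then required
      else
        reqLoopA inputs connections fuel
          (PySem.Set.union required layer_nodes) (PySem.Set.union checked checking)

def required_for_output (inputs : List Int) (outputs : List Int) (connections : List (Int × Int)) : List Int :=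
  PySem.List.sorted
    (reqLoopA inputs connections (connections.length + 1)
      (PySem.Set.ofList outputs) (PySem.Set.ofList outputs))
    (fun x => x) false

-- ===== PORT B =====
-- for (a, b) in connections: preds.setdefault(b, []).append(a)
def predMap (connections : List (Int × Int)) : PySem.Dict Int (List Int) :=
  (connections.map (fun p => (p.2, p.1))).foldl
    (fun d p => d.modify p.1 [] (· ++ [p.2])) PySem.Dict.empty

-- checking = set(); for node in frontier: for a in preds.get(node, ()): if a not in checked: checking.add(a)
def checkingFrontier (preds : PySem.Dict Int (List Int)) (checked frontier : PySem.Set Int) :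
    PySem.Set Int :=
  frontier.foldl (fun acc node =>
      (preds.getD node []).foldl
        (fun acc a => if PySem.Set.contains checked a then acc else PySem.Set.add acc a) acc)
    PySem.Set.empty

-- B's 'while frontier' loop, same fuel bound as A's loop; 'inset' is input_set = set(inputs)
def reqLoopB (inset : PySem.Set Int) (preds : PySem.Dict Int (List Int)) :
    Nat → PySem.Set Int → PySem.Set Int → PySem.Set Int → PySem.Set Int
  | 0, required, _, _ => required
  | fuel + 1, required, checked, frontier =>
    if frontier = [] then required
    else
      let checking := checkingFrontier preds checked frontier
      if checking = [] then required
      else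
        let layer := layerOf inset checking
        if layer = [] then required
        else
          reqLoopB inset preds fuel
            (PySem.Set.union required layer) (PySem.Set.union checked checking) checking

def required_for_output_alt (inputs : List Int) (outputs : List Int) (connections : List (Int × Int)) : List Int :=
  PySem.List.sorted
    (reqLoopB (PySem.Set.ofList inputs) (predMap connections) (connections.length + 1)
      (PySem.Set.ofList outputs) (PySem.Set.ofList outputs) (PySem.Set.ofList outputs))
    (fun x => x) false

-- ===== PRECONDITION & SPEC =====
def Spec_required_for_output (inputs : List Int) (outputs : List Int) (connections : List (Int × Int)) (out : List Int) : Prop := out = required_for_output_alt inputs outputs connections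
instance (inputs : List Int) (outputs : List Int) (connections : List (Int × Int)) (out : List Int) : Decidable (Spec_required_for_output inputs outputs connections out) := by unfold Spec_required_for_output; infer_instance

-- ===== CLAIM (what is proved, stated in full; the proofs are below) =====
def Claim_equal_required_for_output : Prop := ∀ (inputs : List Int) (outputs : List Int) (connections : List (Int × Int)), Dom_required_for_output inputs outputs connections → Spec_required_for_output inputs outputs connections (required_for_output inputs outputs connections)

-- ===== LEMMAS AND PROOFS =====

lemma reqLoopA_succ (inputs : List Int) (connections : List (Int × Int)) (fuel : Nat)
    (required checked : PySem.Set Int) :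
    reqLoopA inputs connections (fuel + 1) required checked =
      if checkingScan connections checked = [] then required
      else if layerOf inputs (checkingScan connections checked) = [] then required
      else reqLoopA inputs connections fuel
        (PySem.Set.union required (layerOf inputs (checkingScan connections checked)))
        (PySem.Set.union checked (checkingScan connections checked)) := rfl

lemma reqLoopB_succ (inset : PySem.Set Int) (preds : PySem.Dict Int (List Int)) (fuel : Nat)
    (required checked frontier : PySem.Set Int) :
    reqLoopB inset preds (fuel + 1) required checked frontier =
      if frontier = [] then required
      else if checkingFrontier preds checked frontier = [] then required
      else if layerOf inset (checkingFrontier preds checked frontier) = [] then required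
      else reqLoopB inset preds fuel
        (PySem.Set.union required (layerOf inset (checkingFrontier preds checked frontier)))
        (PySem.Set.union checked (checkingFrontier preds checked frontier))
        (checkingFrontier preds checked frontier) := rfl

lemma mem_checkingScan (connections : List (Int × Int)) (checked : PySem.Set Int) (x : Int) :
    x ∈ checkingScan connections checked ↔
      ∃ b, (x, b) ∈ connections ∧ b ∈ checked ∧ x ∉ checked := by
  simp only [checkingScan, PySem.Set.mem_ofList, List.mem_map, List.mem_filter,
    Bool.and_eq_true, Bool.not_eq_true']
  constructor
  · rintro ⟨⟨a, b⟩, ⟨hm, hb, ha⟩, rfl⟩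
    refine ⟨b, hm, (PySem.Set.contains_iff _ _).mp hb, fun h => ?_⟩
    rw [(PySem.Set.contains_iff _ _).mpr h] at ha
    simp at ha
  · rintro ⟨b, hm, hb, hx⟩
    refine ⟨(x, b), ⟨hm, (PySem.Set.contains_iff _ _).mpr hb, ?_⟩, rfl⟩
    cases hc : PySem.Set.contains checked x
    · rfl
    · exact absurd ((PySem.Set.contains_iff _ _).mp hc) hx

lemma mem_layerOf (inputs : List Int) (checking : PySem.Set Int) (x : Int) :
    x ∈ layerOf inputs checking ↔ x ∈ checking ∧ x ∉ inputs := by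
  simp [layerOf, PySem.Set.mem_ofList, List.mem_filter]

lemma mem_predMap (connections : List (Int × Int)) (a b : Int) :
    a ∈ (predMap connections).getD b [] ↔ (a, b) ∈ connections := by
  unfold predMap
  rw [PySem.Dict.getD_foldl_modify_append]
  simp [List.mem_filter, List.mem_map, PySem.Dict.getD_empty]

lemma mem_innerFold (checked : PySem.Set Int) (l : List Int) (acc : PySem.Set Int) (x : Int) :
    x ∈ l.foldl (fun acc a => if PySem.Set.contains checked a then acc else PySem.Set.add acc a) acc
      ↔ x ∈ acc ∨ (x ∈ l ∧ x ∉ checked) := by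
  induction l generalizing acc with
  | nil => simp
  | cons h t ih =>
    simp only [List.foldl_cons, ih]
    by_cases hc : h ∈ checked
    · rw [if_pos ((PySem.Set.contains_iff _ _).mpr hc)]
      constructor
      · rintro (ha | hb)
        · exact Or.inl ha
        · exact Or.inr ⟨List.mem_cons_of_mem _ hb.1, hb.2⟩
      · rintro (ha | ⟨hm, hx⟩)
        · exact Or.inl ha
        · rcases List.mem_cons.mp hm with rfl | hm
          · exact absurd hc hx
          · exact Or.inr ⟨hm, hx⟩
    · rw [if_neg (fun hcontra => hc ((PySem.Set.contains_iff _ _).mp hcontra))]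
      simp only [PySem.Set.mem_add]
      constructor
      · rintro ((ha | rfl) | hb)
        · exact Or.inl ha
        · exact Or.inr ⟨List.mem_cons_self .., hc⟩
        · exact Or.inr ⟨List.mem_cons_of_mem _ hb.1, hb.2⟩
      · rintro (ha | ⟨hm, hx⟩)
        · exact Or.inl (Or.inl ha)
        · rcases List.mem_cons.mp hm with rfl | hm
          · exact Or.inl (Or.inr rfl)
          · exact Or.inr ⟨hm, hx⟩

lemma mem_checkingFrontier (preds : PySem.Dict Int (List Int)) (checked frontier : PySem.Set Int)
    (x : Int) :
    x ∈ checkingFrontier preds checked frontier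
      ↔ ∃ f ∈ frontier, x ∈ preds.getD f [] ∧ x ∉ checked := by
  have key : ∀ (fr : List Int) (acc : PySem.Set Int),
      x ∈ fr.foldl (fun acc node =>
          (preds.getD node []).foldl
            (fun acc a => if PySem.Set.contains checked a then acc else PySem.Set.add acc a) acc)
          acc
        ↔ x ∈ acc ∨ ∃ f ∈ fr, x ∈ preds.getD f [] ∧ x ∉ checked := by
    intro fr
    induction fr with
    | nil => simp
    | cons h t ih =>
      intro acc
      simp only [List.foldl_cons, ih, mem_innerFold]
      constructor
      · rintro ((ha | ⟨hl, hc⟩) | ⟨f, hf, hm, hc⟩)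
        · exact Or.inl ha
        · exact Or.inr ⟨h, List.mem_cons_self .., hl, hc⟩
        · exact Or.inr ⟨f, List.mem_cons_of_mem _ hf, hm, hc⟩
      · rintro (ha | ⟨f, hf, hm, hc⟩)
        · exact Or.inl (Or.inl ha)
        · rcases List.mem_cons.mp hf with rfl | hf
          · exact Or.inl (Or.inr ⟨hm, hc⟩)
          · exact Or.inr ⟨f, hf, hm, hc⟩
  refine (key frontier PySem.Set.empty).trans ?_
  simp [PySem.Set.empty]

lemma nodup_reqLoopA (inputs : List Int) (connections : List (Int × Int)) (fuel : Nat)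
    (req chk : PySem.Set Int) (h : req.Nodup) :
    (reqLoopA inputs connections fuel req chk).Nodup := by
  induction fuel generalizing req chk with
  | zero => exact h
  | succ n ih =>
    rw [reqLoopA_succ]
    split
    · exact h
    · split
      · exact h
      · exact ih _ _ (PySem.Set.nodup_union _ _ h)

lemma nodup_reqLoopB (inset : PySem.Set Int) (preds : PySem.Dict Int (List Int)) (fuel : Nat)
    (req chk fr : PySem.Set Int) (h : req.Nodup) :
    (reqLoopB inset preds fuel req chk fr).Nodup := by
  induction fuel generalizing req chk fr with
  | zero => exact h
  | succ n ih =>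
    rw [reqLoopB_succ]
    split
    · exact h
    · split
      · exact h
      · split
        · exact h
        · exact ih _ _ _ (PySem.Set.nodup_union _ _ h)

lemma loop_mem (inputs : List Int) (connections : List (Int × Int)) (fuel : Nat) :
    ∀ (reqA chkA reqB chkB frontier : PySem.Set Int),
    (∀ x, x ∈ reqA ↔ x ∈ reqB) →
    (∀ x, x ∈ chkA ↔ x ∈ chkB) →
    (∀ x ∈ frontier, x ∈ chkB) →
    (∀ p ∈ connections, p.2 ∈ chkB → p.2 ∉ frontier → p.1 ∈ chkB) →
    ∀ x, x ∈ reqLoopA inputs connections fuel reqA chkA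
        ↔ x ∈ reqLoopB (PySem.Set.ofList inputs) (predMap connections) fuel reqB chkB frontier := by
  induction fuel with
  | zero => intro _ _ _ _ _ hreq _ _ _ x; exact hreq x
  | succ n ih =>
    intro reqA chkA reqB chkB frontier hreq hchk hfr hinv x
    rw [reqLoopA_succ, reqLoopB_succ]
    -- the two rounds discover the same set of new nodes
    have hck : ∀ y, y ∈ checkingScan connections chkA ↔
        y ∈ checkingFrontier (predMap connections) chkB frontier := by
      intro y
      rw [mem_checkingScan, mem_checkingFrontier]
      constructor
      · rintro ⟨b, hm, hb, hy⟩
        have hyB : y ∉ chkB := fun h => hy ((hchk y).mpr h)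
        by_cases hbf : b ∈ frontier
        · exact ⟨b, hbf, (mem_predMap connections y b).mpr hm, hyB⟩
        · exact absurd ((hchk y).mpr (hinv (y, b) hm ((hchk b).mp hb) hbf)) hy
      · rintro ⟨f, hf, hm, hy⟩
        exact ⟨f, (mem_predMap connections y f).mp hm, (hchk f).mpr (hfr f hf),
          fun h => hy ((hchk y).mp h)⟩
    have hlay : ∀ y, y ∈ layerOf inputs (checkingScan connections chkA) ↔
        y ∈ layerOf (PySem.Set.ofList inputs) (checkingFrontier (predMap connections) chkB frontier) := by
      intro y
      rw [mem_layerOf, mem_layerOf, hck y]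
      simp [PySem.Set.mem_ofList]
    by_cases hfrE : frontier = []
    · rw [if_pos hfrE]
      have hCA : checkingScan connections chkA = [] := by
        rw [List.eq_nil_iff_forall_not_mem]
        intro y hy
        have := (hck y).mp hy
        rw [mem_checkingFrontier] at this
        rcases this with ⟨f, hf, -, -⟩
        rw [hfrE] at hf; cases hf
      rw [if_pos hCA]; exact hreq x
    · rw [if_neg hfrE]
      by_cases hCA : checkingScan connections chkA = []
      · have hCB : checkingFrontier (predMap connections) chkB frontier = [] := by
          rw [List.eq_nil_iff_forall_not_mem]
          intro y hy
          have := (hck y).mpr hy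
          rw [hCA] at this; cases this
        rw [if_pos hCA, if_pos hCB]; exact hreq x
      · have hCB : checkingFrontier (predMap connections) chkB frontier ≠ [] := by
          intro hE
          apply hCA
          rw [List.eq_nil_iff_forall_not_mem]
          intro y hy
          have := (hck y).mp hy
          rw [hE] at this; cases this
        rw [if_neg hCA, if_neg hCB]
        by_cases hLA : layerOf inputs (checkingScan connections chkA) = []
        · have hLB : layerOf (PySem.Set.ofList inputs) (checkingFrontier (predMap connections) chkB frontier) = [] := by
            rw [List.eq_nil_iff_forall_not_mem]
            intro y hy
            have := (hlay y).mpr hy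
            rw [hLA] at this; cases this
          rw [if_pos hLA, if_pos hLB]; exact hreq x
        · have hLB : layerOf (PySem.Set.ofList inputs) (checkingFrontier (predMap connections) chkB frontier) ≠ [] := by
            intro hE
            apply hLA
            rw [List.eq_nil_iff_forall_not_mem]
            intro y hy
            have := (hlay y).mp hy
            rw [hE] at this; cases this
          rw [if_neg hLA, if_neg hLB]
          apply ih
          · intro y
            rw [PySem.Set.mem_union, PySem.Set.mem_union, hreq y, hlay y]
          · intro y
            rw [PySem.Set.mem_union, PySem.Set.mem_union, hchk y, hck y]
          · intro y hy
            exact (PySem.Set.mem_union _ _ _).mpr (Or.inr hy)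
          · intro p hp h2 h2n
            rcases (PySem.Set.mem_union _ _ _).mp h2 with h2B | h2C
            · by_cases hpf : p.2 ∈ frontier
              · by_cases hp1 : p.1 ∈ chkB
                · exact (PySem.Set.mem_union _ _ _).mpr (Or.inl hp1)
                · refine (PySem.Set.mem_union _ _ _).mpr (Or.inr ?_)
                  rw [mem_checkingFrontier]
                  exact ⟨p.2, hpf, (mem_predMap connections p.1 p.2).mpr hp, hp1⟩
              · exact (PySem.Set.mem_union _ _ _).mpr (Or.inl (hinv p hp h2B hpf))
            · exact absurd h2C h2n

-- ===== VERDICT (by name: the statement is the Claim_ definition above) =====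
theorem required_for_output_spec : Claim_equal_required_for_output := by
  intro inputs outputs connections _
  unfold Spec_required_for_output required_for_output required_for_output_alt
  have hmem := loop_mem inputs connections (connections.length + 1)
    (PySem.Set.ofList outputs) (PySem.Set.ofList outputs)
    (PySem.Set.ofList outputs) (PySem.Set.ofList outputs) (PySem.Set.ofList outputs)
    (fun _ => Iff.rfl) (fun _ => Iff.rfl) (fun _ h => h) (fun p _ h hn => absurd h hn)
  have hA := nodup_reqLoopA inputs connections (connections.length + 1)
    (PySem.Set.ofList outputs) (PySem.Set.ofList outputs) (PySem.Set.nodup_ofList outputs)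
  have hB := nodup_reqLoopB (PySem.Set.ofList inputs) (predMap connections) (connections.length + 1)
    (PySem.Set.ofList outputs) (PySem.Set.ofList outputs) (PySem.Set.ofList outputs)
    (PySem.Set.nodup_ofList outputs)
  have hperm := (List.perm_ext_iff_of_nodup hA hB).mpr hmem
  exact PySem.List.sorted_eq_sorted_of_perm _ _ _ (fun a b h => h) hperm
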